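-- pv_equiv track=rewrite | github.com/ShotaIuchi/idse | idse/idse.py | get_increment
-- ===== SOURCE A (Python) =====
-- def get_increment(last_text, data):
--     common_length = 0
--     for i in range(min(len(last_text), len(data))):
--         if last_text[i] != data[i]:
--             break
--         common_length += 1
--
--     increment = data[common_length:]
--     return increment
-- ===== SOURCE B (Python) =====
-- def get_increment(last_text, data):
--     # Binary search for the common-prefix length: prefix equality is monotone
--     # in k, so find the largest k with last_text[:k] == data[:k].
--     lo, hi = 0, min(len(last_text), len(data))
--     while lo < hi:
--         mid = (lo + hi + 1) // 2
--         if last_text[:mid] == data[:mid]: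
--             lo = mid
--         else:
--             hi = mid - 1
--     return data[lo:]
-- ===== Notes on version B (the rewrite author's own statement) =====
-- stated objective: alternative
-- what changed: Replaces A's per-character counting loop (count matches over range(min(len,len)), break on mismatch, then slice) by a binary search for the common-prefix length using whole-slice equality tests, then one slice.
import Mathlib
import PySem

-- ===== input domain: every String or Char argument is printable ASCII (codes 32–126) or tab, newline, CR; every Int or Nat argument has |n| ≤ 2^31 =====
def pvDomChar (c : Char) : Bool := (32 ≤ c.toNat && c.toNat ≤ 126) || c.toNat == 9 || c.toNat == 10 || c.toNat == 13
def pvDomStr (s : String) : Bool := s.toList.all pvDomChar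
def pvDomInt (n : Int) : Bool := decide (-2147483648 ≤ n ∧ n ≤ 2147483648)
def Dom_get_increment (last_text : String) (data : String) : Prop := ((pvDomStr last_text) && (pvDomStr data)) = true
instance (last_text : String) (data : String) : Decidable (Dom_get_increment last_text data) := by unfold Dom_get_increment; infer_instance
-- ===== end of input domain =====

-- B replaces A's per-character counting loop by a binary search for the common-prefix length (different algorithm; same order of cost).


-- ===== PORT A =====
-- A's for-loop over range(min(len,len)): carries common_length; 'break' = return the accumulator.
def loopA (lt dt : List Char) : List Int → Nat → Nat
  | [], cl => cl
  | i :: rest, cl =>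
      if PySem.List.pyGetD lt i ' ' ≠ PySem.List.pyGetD dt i ' ' then cl
      else loopA lt dt rest (cl + 1)

def get_increment (last_text : String) (data : String) : String :=
  let cl := loopA last_text.toList data.toList
      (PySem.List.pyRange 0 (min (PySem.Str.len last_text) (PySem.Str.len data)) 1) 0
  String.ofList (PySem.List.slice data.toList (some (cl : Int)) none)

-- ===== PORT B =====
-- B's while-loop: binary search on lo..hi; Python's s[:mid] is List.take mid (mid ≥ 0),
-- Python's (lo+hi+1)//2 on non-negative operands is Nat division (exact here).
def bsGo (lt dt : List Char) (lo hi : Nat) : Nat :=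
  if h : lo < hi then
    let mid := (lo + hi + 1) / 2
    if lt.take mid = dt.take mid then bsGo lt dt mid hi
    else bsGo lt dt lo (mid - 1)
  else lo
termination_by hi - lo
decreasing_by
  · omega
  · omega

def get_increment_alt (last_text : String) (data : String) : String :=
  String.ofList (data.toList.drop
    (bsGo last_text.toList data.toList 0 (min last_text.toList.length data.toList.length)))

-- ===== PRECONDITION & SPEC =====
def Spec_get_increment (last_text : String) (data : String) (out : String) : Prop := out = get_increment_alt last_text data
instance (last_text : String) (data : String) (out : String) : Decidable (Spec_get_increment last_text data out) := by unfold Spec_get_increment; infer_instance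

-- ===== CLAIM (what is proved, stated in full; the proofs are below) =====
def Claim_equal_get_increment : Prop := ∀ (last_text : String) (data : String), Dom_get_increment last_text data → Spec_get_increment last_text data (get_increment last_text data)

-- ===== LEMMAS AND PROOFS =====

-- The common-prefix length, as a specification shared by both proofs.
def cc : List Char → List Char → Nat
  | a :: as, d :: ds => if a = d then cc as ds + 1 else 0
  | _, _ => 0

theorem cc_le_min : ∀ (lt dt : List Char), cc lt dt ≤ min lt.length dt.length := by
  intro lt
  induction lt with
  | nil => intro dt; simp [cc]
  | cons a as ih =>
      intro dt
      cases dt with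
      | nil => simp [cc]
      | cons d ds =>
          by_cases h : a = d
          · have := ih ds
            simp only [cc, if_pos h, List.length_cons]
            omega
          · simp [cc, h]

-- Prefix equality is exactly 'k ≤ cc' (for k within both lengths): the monotone
-- predicate B's binary search decides.
theorem take_eq_iff_le_cc : ∀ (lt dt : List Char) (k : Nat),
    k ≤ lt.length → k ≤ dt.length → (lt.take k = dt.take k ↔ k ≤ cc lt dt) := by
  intro lt
  induction lt with
  | nil =>
      intro dt k h1 _
      have hk : k = 0 := by simpa using h1
      subst hk
      simp
  | cons a as ih =>
      intro dt k h1 h2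
      cases k with
      | zero => simp
      | succ k' =>
          cases dt with
          | nil => simp at h2
          | cons d ds =>
              simp only [List.take_succ_cons, List.cons.injEq, cc]
              by_cases h : a = d
              · rw [if_pos h, ih ds k' (by simpa using h1) (by simpa using h2)]
                constructor
                · rintro ⟨_, hk⟩; omega
                · intro hk; exact ⟨h, by omega⟩
              · rw [if_neg h]
                constructor
                · rintro ⟨he, _⟩; exact absurd he h
                · intro hk; omega

-- A's loop invariant: run from index cl over the remaining indices, the final
-- counter is cl plus the common-prefix length of the two suffixes.
theorem loopA_cc (lt dt : List Char) :
    ∀ (m cl : Nat), cl + m = min lt.length dt.length →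
      loopA lt dt ((List.range' cl m).map (Nat.cast : Nat → Int)) cl
        = cl + cc (lt.drop cl) (dt.drop cl) := by
  intro m
  induction m with
  | zero =>
      intro cl h
      simp only [List.range'_zero, List.map_nil, loopA]
      have hor : lt.length ≤ cl ∨ dt.length ≤ cl := by omega
      rcases hor with hl | hr
      · rw [List.drop_eq_nil_of_le hl]
        cases dt.drop cl <;> simp [cc]
      · rw [List.drop_eq_nil_of_le hr]
        cases lt.drop cl <;> simp [cc]
  | succ m ih =>
      intro cl h
      have h1 : cl < lt.length := by omega
      have h2 : cl < dt.length := by omega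
      rw [List.range'_succ, List.map_cons]
      simp only [loopA, PySem.List.pyGetD_natCast, List.getD_eq_getElem?_getD,
        List.getElem?_eq_getElem h1, List.getElem?_eq_getElem h2, Option.getD_some]
      rw [List.drop_eq_getElem_cons h1, List.drop_eq_getElem_cons h2]
      by_cases heq : lt[cl] = dt[cl]
      · rw [if_neg (by simp [heq]), ih (cl + 1) (by omega)]
        simp only [cc, if_pos heq]
        omega
      · simp [cc, heq]

-- B's loop invariant: if cc lies in [lo, hi] and hi is within both lengths,
-- the binary search returns cc.
theorem bsGo_cc (lt dt : List Char) :
    ∀ (lo hi : Nat), lo ≤ cc lt dt → cc lt dt ≤ hi → hi ≤ min lt.length dt.length →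
      bsGo lt dt lo hi = cc lt dt := by
  intro lo hi
  induction lo, hi using bsGo.induct lt dt with
  | case1 lo hi hlt mid heq ih =>
      intro hlo hhi hmin
      rw [bsGo, dif_pos hlt]
      have hm : (lo + hi + 1) / 2 = mid := rfl
      rw [hm, if_pos heq]
      have hmidcc : mid ≤ cc lt dt := by
        have := (take_eq_iff_le_cc lt dt mid (by omega) (by omega)).mp heq
        exact this
      exact ih hmidcc hhi hmin
  | case2 lo hi hlt mid hne ih =>
      intro hlo hhi hmin
      rw [bsGo, dif_pos hlt]
      have hm : (lo + hi + 1) / 2 = mid := rfl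
      rw [hm, if_neg hne]
      have hmidcc : ¬ mid ≤ cc lt dt := fun hc =>
        hne ((take_eq_iff_le_cc lt dt mid (by omega) (by omega)).mpr hc)
      exact ih hlo (by omega) (by omega)
  | case3 lo hi hge =>
      intro hlo hhi hmin
      rw [bsGo, dif_neg hge]
      omega

theorem get_increment_spec : Claim_equal_get_increment := by
  intro last_text data _
  unfold Spec_get_increment get_increment get_increment_alt
  have hmin : min (PySem.Str.len last_text) (PySem.Str.len data)
      = ((min last_text.toList.length data.toList.length : Nat) : Int) := by
    simp [PySem.Str.len_eq]
  rw [hmin, PySem.List.pyRange_one]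
  have hR : ((((min last_text.toList.length data.toList.length : Nat) : Int) - 0).toNat)
      = min last_text.toList.length data.toList.length := by omega
  rw [hR]
  have hmap : (List.range (min last_text.toList.length data.toList.length)).map
        (fun k : Nat => (0 : Int) + (k : Int))
      = (List.range' 0 (min last_text.toList.length data.toList.length)).map
        (Nat.cast : Nat → Int) := by
    rw [List.range_eq_range']
    simp
  rw [hmap]
  show String.ofList (PySem.List.slice data.toList
      (some ((loopA last_text.toList data.toList
        ((List.range' 0 (min last_text.toList.length data.toList.length)).map
          (Nat.cast : Nat → Int)) 0 : Nat) : Int)) none)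
    = _
  rw [PySem.List.slice_from_natCast]
  rw [loopA_cc last_text.toList data.toList
        (min last_text.toList.length data.toList.length) 0 (by omega)]
  rw [bsGo_cc last_text.toList data.toList 0
        (min last_text.toList.length data.toList.length)
        (Nat.zero_le _) (cc_le_min _ _) le_rfl]
  simp
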